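-- pv_equiv track=rewrite | github.com/moritztng/tt-boltz | mgtbind/prepare.py | build_yaml
-- ===== SOURCE A (Python) =====
-- import string
--
-- def make_chain_ids(n: int) -> list[str]:
--     """Return n unique chain IDs: A … Z, AA … ZZ."""
--     ids = []
--     for c in string.ascii_uppercase:
--         ids.append(c)
--         if len(ids) == n:
--             return ids
--     for c1 in string.ascii_uppercase:
--         for c2 in string.ascii_uppercase:
--             ids.append(c1 + c2)
--             if len(ids) == n:
--                 return ids
--     raise ValueError(f"Cannot generate {n} chain IDs")
--
-- def build_yaml(protein_a_seq: str, protein_b_seq: str, smiles: str) -> tuple[str, int, int]: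
--     """Build a Boltz-2 YAML input from sequences and SMILES.
--
--     Underscores in protein sequences denote multi-chain assemblies;
--     each segment becomes a separate protein chain.
--
--     Returns (yaml_str, mg_asym_id, total_chains).
--     """
--     a_chains = protein_a_seq.split("_")
--     b_chains = protein_b_seq.split("_")
--     total_chains = len(a_chains) + len(b_chains) + 1  # +1 for ligand
--     cids = make_chain_ids(total_chains)
--
--     lines = ["version: 1", "sequences:"]
--     idx = 0
--
--     for sub in a_chains:
--         lines += [f"  - protein:", f"      id: {cids[idx]}", f"      sequence: {sub}"]
--         idx += 1
--
--     for sub in b_chains: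
--         lines += [f"  - protein:", f"      id: {cids[idx]}", f"      sequence: {sub}"]
--         idx += 1
--
--     mg_asym_id = idx
--     lines += [f"  - ligand:", f"      id: {cids[idx]}", f"      smiles: '{smiles}'"]
--
--     return "\n".join(lines) + "\n", mg_asym_id, total_chains
-- ===== SOURCE B (Python) =====
-- def build_yaml(protein_a_seq: str, protein_b_seq: str, smiles: str) -> tuple[str, int, int]:
--     """Build a Boltz-2 YAML input from sequences and SMILES.
--
--     Same result as A, but chain IDs come from a direct index->label
--     formula instead of growing a list, and the two protein loops are
--     merged into one pass over all chains.
--     """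
--     chains = protein_a_seq.split("_") + protein_b_seq.split("_")
--     mg_asym_id = len(chains)
--     total_chains = mg_asym_id + 1
--     if total_chains > 702:
--         raise ValueError(f"Cannot generate {total_chains} chain IDs")
--
--     def cid(i: int) -> str:
--         if i < 26:
--             return chr(65 + i)
--         j = i - 26
--         return chr(65 + j // 26) + chr(65 + j % 26)
--
--     lines = ["version: 1", "sequences:"]
--     for i, seq in enumerate(chains):
--         lines += ["  - protein:", f"      id: {cid(i)}", f"      sequence: {seq}"]
--     lines += ["  - ligand:", f"      id: {cid(mg_asym_id)}", f"      smiles: '{smiles}'"]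
--     return "\n".join(lines) + "\n", mg_asym_id, total_chains
-- ===== Notes on version B (the rewrite author's own statement) =====
-- stated objective: idiomatic
-- what changed: Chain IDs come from a direct index->label arithmetic formula (chr(65+i) / two-letter via divmod) instead of growing a 702-entry list with early-return checks, and the two protein loops are merged into a single enumerate pass over a_chains+b_chains.
import Mathlib
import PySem

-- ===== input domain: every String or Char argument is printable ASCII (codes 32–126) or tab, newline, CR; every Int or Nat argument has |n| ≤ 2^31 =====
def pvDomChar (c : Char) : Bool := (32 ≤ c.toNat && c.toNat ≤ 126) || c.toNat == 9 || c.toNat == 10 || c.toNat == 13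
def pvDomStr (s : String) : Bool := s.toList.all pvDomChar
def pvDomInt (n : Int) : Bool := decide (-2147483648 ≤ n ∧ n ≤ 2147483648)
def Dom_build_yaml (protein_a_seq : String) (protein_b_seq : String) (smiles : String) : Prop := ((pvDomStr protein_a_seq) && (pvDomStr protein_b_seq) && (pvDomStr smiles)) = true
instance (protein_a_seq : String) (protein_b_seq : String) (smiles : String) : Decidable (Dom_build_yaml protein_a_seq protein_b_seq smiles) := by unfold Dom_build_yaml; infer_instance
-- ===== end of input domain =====

-- B replaces A's grow-a-list-of-702-ids loops by a direct index→label formula and merges the two protein loops into one pass (objective: idiomatic/simpler).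

-- ===== PORT A =====
-- s.split("_"): sep is nonempty so Python never raises; split? is some here
def pvSplitU (s : String) : List String := (PySem.Str.split? s "_").getD []

-- string.ascii_uppercase
def pvUpper : List Char := "ABCDEFGHIJKLMNOPQRSTUVWXYZ".toList

-- 'for c in string.ascii_uppercase: ids.append(c); if len(ids)==n: return ids'
-- (.inr = early return, .inl = loop fell through with the accumulated ids)
def pvMciLoop1 (n : Int) : List Char → List String → (List String) ⊕ (List String)
  | [], ids => .inl ids
  | c :: cs, ids =>
      let ids' := ids ++ [String.mk [c]]
      if (ids'.length : Int) = n then .inr ids' else pvMciLoop1 n cs ids'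

-- inner 'for c2 in string.ascii_uppercase: ids.append(c1+c2); if len(ids)==n: return ids'
def pvMciInner (n : Int) (c1 : Char) : List Char → List String → (List String) ⊕ (List String)
  | [], ids => .inl ids
  | c2 :: cs, ids =>
      let ids' := ids ++ [String.mk [c1, c2]]
      if (ids'.length : Int) = n then .inr ids' else pvMciInner n c1 cs ids'

-- outer 'for c1 in string.ascii_uppercase: <inner loop>'
def pvMciLoop2 (n : Int) : List Char → List String → (List String) ⊕ (List String)
  | [], ids => .inl ids
  | c1 :: cs, ids =>
      match pvMciInner n c1 pvUpper ids with
      | .inr r => .inr r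
      | .inl ids' => pvMciLoop2 n cs ids'

-- make_chain_ids; none = the final 'raise ValueError'
def make_chain_ids (n : Int) : Option (List String) :=
  match pvMciLoop1 n pvUpper [] with
  | .inr r => some r
  | .inl ids =>
    match pvMciLoop2 n pvUpper ids with
    | .inr r => some r
    | .inl _ => none

-- body of A's two protein 'for' loops: state = (lines, idx)
def pvProtA (cids : List String) (p : List String × Int) (sub : String) : List String × Int :=
  (p.1 ++ ["  - protein:", "      id: " ++ PySem.List.pyGetD cids p.2 "", "      sequence: " ++ sub], p.2 + 1)

def build_yaml (protein_a_seq : String) (protein_b_seq : String) (smiles : String) : String × Int × Int :=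
  let a_chains := pvSplitU protein_a_seq
  let b_chains := pvSplitU protein_b_seq
  let total_chains : Int := a_chains.length + b_chains.length + 1
  match make_chain_ids total_chains with
  | none => ("", 0, 0)  -- A raises ValueError here; excluded by Pre_
  | some cids =>
    let st1 := a_chains.foldl (pvProtA cids) (["version: 1", "sequences:"], 0)
    let st2 := b_chains.foldl (pvProtA cids) st1
    let mg_asym_id := st2.2
    let lines := st2.1 ++ ["  - ligand:", "      id: " ++ PySem.List.pyGetD cids mg_asym_id "", "      smiles: '" ++ smiles ++ "'"]
    (PySem.Str.join "\n" lines ++ "\n", mg_asym_id, total_chains)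

-- ===== PORT B =====
-- chr(65+i) / chr(65 + j//26) + chr(65 + j%26); exact: the codes are valid code points
def pvCid (i : Int) : String :=
  if i < 26 then String.mk [Char.ofNat (65 + i).toNat]
  else
    let j := i - 26
    String.mk [Char.ofNat (65 + PySem.Int.floordiv j 26).toNat,
               Char.ofNat (65 + PySem.Int.mod j 26).toNat]

-- body of B's single enumerate loop
def pvProtB (p : Int × String) : List String :=
  ["  - protein:", "      id: " ++ pvCid p.1, "      sequence: " ++ p.2]

def build_yaml_alt (protein_a_seq : String) (protein_b_seq : String) (smiles : String) : String × Int × Int :=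
  let chains := pvSplitU protein_a_seq ++ pvSplitU protein_b_seq
  let mg_asym_id : Int := chains.length
  let total_chains : Int := mg_asym_id + 1
  if total_chains > 702 then ("", 0, 0)  -- B raises ValueError here; excluded by Pre_
  else
    let lines := ["version: 1", "sequences:"]
      ++ (PySem.List.enumerate chains 0).flatMap pvProtB
      ++ ["  - ligand:", "      id: " ++ pvCid mg_asym_id, "      smiles: '" ++ smiles ++ "'"]
    (PySem.Str.join "\n" lines ++ "\n", mg_asym_id, total_chains)

-- ===== PRECONDITION & SPEC =====
-- Pre_ excludes exactly the inputs (≥ 702 underscore-separated chains) on which A's make_chain_ids raises ValueError (B raises the same error there).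
def Pre_build_yaml (protein_a_seq : String) (protein_b_seq : String) (smiles : String) : Prop :=
  (pvSplitU protein_a_seq).length + (pvSplitU protein_b_seq).length + 1 ≤ 702

instance (protein_a_seq : String) (protein_b_seq : String) (smiles : String) : Decidable (Pre_build_yaml protein_a_seq protein_b_seq smiles) := by unfold Pre_build_yaml; infer_instance

def pvWitness_build_yaml : String × String × String := ("MKT_GG", "AAC", "CCO")

def Spec_build_yaml (protein_a_seq : String) (protein_b_seq : String) (smiles : String) (out : String × Int × Int) : Prop := out = build_yaml_alt protein_a_seq protein_b_seq smiles
instance (protein_a_seq : String) (protein_b_seq : String) (smiles : String) (out : String × Int × Int) : Decidable (Spec_build_yaml protein_a_seq protein_b_seq smiles out) := by unfold Spec_build_yaml; infer_instance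

-- ===== CLAIM (what is proved, stated in full; the proofs are below) =====
def Claim_equal_build_yaml : Prop := ∀ (protein_a_seq : String) (protein_b_seq : String) (smiles : String), Dom_build_yaml protein_a_seq protein_b_seq smiles → Pre_build_yaml protein_a_seq protein_b_seq smiles → Spec_build_yaml protein_a_seq protein_b_seq smiles (build_yaml protein_a_seq protein_b_seq smiles)

-- ===== LEMMAS AND PROOFS =====

-- B's label for index i, as a Nat-indexed function
def pvG (i : Nat) : String := pvCid (i : Int)

def pvSing : List String := pvUpper.map (fun c => String.mk [c])
def pvRow (c1 : Char) : List String := pvUpper.map (fun c2 => String.mk [c1, c2])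
def pvPairs : List String := pvUpper.flatMap pvRow
def pvFull : List String := pvSing ++ pvPairs

set_option maxRecDepth 20000 in
lemma pvFull_eq : pvFull = (List.range 702).map pvG := by decide

lemma pvUpper_len : pvUpper.length = 26 := rfl
lemma pvSing_len : pvSing.length = 26 := rfl
lemma pvRow_len (c : Char) : (pvRow c).length = 26 := rfl

lemma loop1_inl (m : Nat) (cs : List Char) (ids : List String)
    (h : ids.length + cs.length < m) :
    pvMciLoop1 (m : Int) cs ids = .inl (ids ++ cs.map (fun c => String.mk [c])) := by
  induction cs generalizing ids with
  | nil => simp [pvMciLoop1]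
  | cons c cs ih =>
      simp only [List.length_cons] at h
      simp only [pvMciLoop1]
      rw [if_neg (by simp only [List.length_append, List.length_cons, List.length_nil]; push_cast; omega)]
      rw [ih (ids ++ [String.mk [c]]) (by simp; omega)]
      simp

lemma loop1_inr (m : Nat) (cs : List Char) (ids : List String)
    (h1 : ids.length < m) (h2 : m ≤ ids.length + cs.length) :
    pvMciLoop1 (m : Int) cs ids
      = .inr (ids ++ (cs.take (m - ids.length)).map (fun c => String.mk [c])) := by
  induction cs generalizing ids with
  | nil => simp at h2; omega
  | cons c cs ih =>
      simp only [List.length_cons] at h2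
      simp only [pvMciLoop1]
      by_cases hm : ids.length + 1 = m
      · rw [if_pos (by simp only [List.length_append, List.length_cons, List.length_nil]; push_cast; omega)]
        have : m - ids.length = 1 := by omega
        simp [this]
      · rw [if_neg (by simp only [List.length_append, List.length_cons, List.length_nil]; push_cast; omega)]
        rw [ih (ids ++ [String.mk [c]]) (by simp; omega) (by simp; omega)]
        have h3 : m - ids.length = (m - (ids ++ [String.mk [c]]).length) + 1 := by simp; omega
        rw [h3]
        simp [List.take_succ_cons]

lemma inner_inl (m : Nat) (c1 : Char) (cs : List Char) (ids : List String)
    (h : ids.length + cs.length < m) :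
    pvMciInner (m : Int) c1 cs ids = .inl (ids ++ cs.map (fun c2 => String.mk [c1, c2])) := by
  induction cs generalizing ids with
  | nil => simp [pvMciInner]
  | cons c cs ih =>
      simp only [List.length_cons] at h
      simp only [pvMciInner]
      rw [if_neg (by simp only [List.length_append, List.length_cons, List.length_nil]; push_cast; omega)]
      rw [ih (ids ++ [String.mk [c1, c]]) (by simp; omega)]
      simp

lemma inner_inr (m : Nat) (c1 : Char) (cs : List Char) (ids : List String)
    (h1 : ids.length < m) (h2 : m ≤ ids.length + cs.length) :
    pvMciInner (m : Int) c1 cs ids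
      = .inr (ids ++ (cs.take (m - ids.length)).map (fun c2 => String.mk [c1, c2])) := by
  induction cs generalizing ids with
  | nil => simp at h2; omega
  | cons c cs ih =>
      simp only [List.length_cons] at h2
      simp only [pvMciInner]
      by_cases hm : ids.length + 1 = m
      · rw [if_pos (by simp only [List.length_append, List.length_cons, List.length_nil]; push_cast; omega)]
        have : m - ids.length = 1 := by omega
        simp [this]
      · rw [if_neg (by simp only [List.length_append, List.length_cons, List.length_nil]; push_cast; omega)]
        rw [ih (ids ++ [String.mk [c1, c]]) (by simp; omega) (by simp; omega)]
        have h3 : m - ids.length = (m - (ids ++ [String.mk [c1, c]]).length) + 1 := by simp; omega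
        rw [h3]
        simp [List.take_succ_cons]

lemma loop2_inr (m : Nat) (cs : List Char) (ids : List String)
    (h1 : ids.length < m) (h2 : m ≤ ids.length + 26 * cs.length) :
    pvMciLoop2 (m : Int) cs ids = .inr (ids ++ (cs.flatMap pvRow).take (m - ids.length)) := by
  induction cs generalizing ids with
  | nil => simp at h2; omega
  | cons c cs ih =>
      simp only [List.length_cons] at h2
      simp only [pvMciLoop2]
      by_cases hm : m ≤ ids.length + 26
      · rw [inner_inr m c pvUpper ids h1 (by rw [pvUpper_len]; omega)]
        rw [List.flatMap_cons, List.take_append_of_le_length (by rw [pvRow_len]; omega)]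
        rw [show pvRow c = List.map (fun c2 => String.mk [c, c2]) pvUpper from rfl]
        rw [← List.map_take]
      · rw [inner_inl m c pvUpper ids (by rw [pvUpper_len]; omega)]
        dsimp only
        have hu : (List.map (fun c2 => String.mk [c, c2]) pvUpper).length = 26 := by
          rw [List.length_map, pvUpper_len]
        rw [ih (ids ++ List.map (fun c2 => String.mk [c, c2]) pvUpper)
            (by rw [List.length_append, hu]; omega)
            (by rw [List.length_append, hu]; omega)]
        congr 1
        rw [List.length_append, hu, List.flatMap_cons, List.take_append]
        rw [List.take_of_length_le (show (pvRow c).length ≤ m - ids.length by rw [pvRow_len]; omega)]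
        rw [pvRow_len]
        rw [show m - ids.length - 26 = m - (ids.length + 26) from by omega]
        rw [List.append_assoc]
        rfl

lemma mci_eq (m : Nat) (h1 : 1 ≤ m) (h2 : m ≤ 702) :
    make_chain_ids (m : Int) = some ((List.range m).map pvG) := by
  have hfull : ((List.range m).map pvG) = pvFull.take m := by
    rw [pvFull_eq, ← List.map_take, List.take_range, Nat.min_eq_left h2]
  rw [hfull]
  unfold make_chain_ids
  by_cases hm : m ≤ 26
  · rw [loop1_inr m pvUpper [] (by simpa using h1) (by rw [List.length_nil, pvUpper_len]; omega)]
    dsimp only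
    rw [List.nil_append, List.length_nil, Nat.sub_zero]
    rw [show pvFull = pvSing ++ pvPairs from rfl]
    rw [List.take_append_of_le_length (by rw [pvSing_len]; omega)]
    rw [show pvSing = List.map (fun c => String.mk [c]) pvUpper from rfl, ← List.map_take]
  · rw [loop1_inl m pvUpper [] (by rw [List.length_nil, pvUpper_len]; omega)]
    dsimp only
    rw [List.nil_append]
    rw [loop2_inr m pvUpper (List.map (fun c => String.mk [c]) pvUpper)
        (by rw [List.length_map, pvUpper_len]; omega)
        (by rw [List.length_map, pvUpper_len]; omega)]
    rw [List.length_map, pvUpper_len]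
    rw [show pvFull = pvSing ++ pvPairs from rfl, List.take_append]
    rw [List.take_of_length_le (show pvSing.length ≤ m by rw [pvSing_len]; omega)]
    rw [pvSing_len]
    rfl

lemma idx_eq (m i : Nat) (hi : i < m) :
    PySem.List.pyGetD ((List.range m).map pvG) (i : Int) "" = pvCid (i : Int) := by
  have hlen : i < ((List.range m).map pvG).length := by simpa using hi
  rw [PySem.List.pyGetD_natCast, List.getD_eq_getElem _ _ hlen]
  simp [pvG]

lemma foldA_eq (m : Nat) (chains : List String) (L : List String) (i0 : Nat)
    (hb : i0 + chains.length ≤ m) :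
    chains.foldl (pvProtA ((List.range m).map pvG)) (L, (i0 : Int))
      = (L ++ (PySem.List.enumerate chains (i0 : Int)).flatMap pvProtB,
         ((i0 + chains.length : Nat) : Int)) := by
  induction chains generalizing L i0 with
  | nil => simp [PySem.List.enumerate]
  | cons x xs ih =>
      have hb' : i0 + xs.length + 1 ≤ m := by simpa using hb
      simp only [List.foldl_cons, pvProtA]
      rw [idx_eq m i0 (by omega)]
      have hcast : (i0 : Int) + 1 = ((i0 + 1 : Nat) : Int) := by push_cast; ring
      rw [hcast, ih _ (i0 + 1) (by omega)]
      rw [PySem.List.enumerate_cons]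
      simp only [List.flatMap_cons, pvProtB, ← hcast]
      rw [Prod.mk.injEq]
      refine ⟨by rw [List.append_assoc], by simp only [List.length_cons]; omega⟩

-- ===== VERDICT (by name: the statement is the Claim_ definition above) =====
theorem build_yaml_spec : Claim_equal_build_yaml := by
  intro a b smiles _ hpre
  unfold Pre_build_yaml at hpre
  have hm1 : 1 ≤ (pvSplitU a).length + (pvSplitU b).length + 1 := by omega
  have hcast : ((pvSplitU a).length : Int) + (pvSplitU b).length + 1
      = (((pvSplitU a).length + (pvSplitU b).length + 1 : Nat) : Int) := by push_cast; ring
  simp only [Spec_build_yaml, build_yaml, build_yaml_alt]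
  rw [hcast, mci_eq _ hm1 hpre]
  dsimp only
  rw [show (0 : Int) = ((0 : Nat) : Int) from rfl,
      foldA_eq _ (pvSplitU a) _ 0 (by omega),
      foldA_eq _ (pvSplitU b) _ ((0 : Nat) + (pvSplitU a).length) (by omega)]
  rw [idx_eq _ ((0 : Nat) + (pvSplitU a).length + (pvSplitU b).length) (by omega)]
  rw [if_neg (by simp only [List.length_append]; push_cast; omega)]
  rw [PySem.List.enumerate_append]
  simp only [Nat.zero_add, zero_add, List.length_append, List.flatMap_append, List.append_assoc,
    Nat.cast_add, Nat.cast_one, Nat.cast_zero]
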